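-- pv_equiv track=rewrite | github.com/vostelmakh/algos | min_multiplication/min_multiplication.py | calculate
-- ===== SOURCE A (Python) =====
-- def calculate(arr):
--     n = len(arr)
--     if n < 2:
--         raise ValueError("arr must contain at least 2 elements")
--
--     min1 = float('inf')
--     min2 = float('inf')
--     max1 = float('-inf')
--     max2 = float('-inf')
--
--     for i in range(n):
--         if arr[i] <= min1:
--             min2 = min1
--             min1 = arr[i]
--         elif arr[i] < min2:
--             min2 = arr[i]
--
--         if arr[i] >= max1:
--             max2 = max1
--             max1 = arr[i]
--         elif arr[i] > max2:
--             max2 = arr[i]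
--
--     if min1 > 0:
--         return min1 * min2
--     elif max1 < 0:
--         return max1 * max2
--     else:
--         return min1 * max1
-- ===== SOURCE B (Python) =====
-- def calculate(arr):
--     if len(arr) < 2:
--         raise ValueError("arr must contain at least 2 elements")
--     s = sorted(arr)
--     return min(s[0] * s[1], s[-1] * s[-2], s[0] * s[-1])
-- ===== Notes on version B (the rewrite author's own statement) =====
-- stated objective: simpler
-- what changed: Replaces A's single-pass tracking of four extremes (with inf sentinels and a sign-based case split) by sorting the list and returning the minimum of three candidate products s[0]*s[1], s[-1]*s[-2], s[0]*s[-1].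
import Mathlib
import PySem

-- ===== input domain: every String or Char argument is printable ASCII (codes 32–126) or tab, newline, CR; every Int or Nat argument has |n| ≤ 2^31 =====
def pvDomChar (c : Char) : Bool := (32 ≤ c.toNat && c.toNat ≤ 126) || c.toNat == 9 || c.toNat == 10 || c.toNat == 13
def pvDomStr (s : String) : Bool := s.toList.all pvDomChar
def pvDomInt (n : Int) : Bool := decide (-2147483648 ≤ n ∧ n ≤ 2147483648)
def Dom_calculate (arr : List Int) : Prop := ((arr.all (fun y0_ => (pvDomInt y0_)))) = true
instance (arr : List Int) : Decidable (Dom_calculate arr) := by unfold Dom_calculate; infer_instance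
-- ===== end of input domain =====

-- B replaces A's single-pass four-extreme tracking with sort-then-three-candidates (objective: simpler); return values proved equal on lists of length ≥ 2.

-- ===== PORT A =====
-- A's float('inf') / float('-inf') sentinels are ported as Option Int: none means "still infinite"
-- (+inf for the min trackers, -inf for the max trackers); the comparisons below are Python's
-- comparisons against those sentinels, exact for every Int element.
def pvLeO (x : Int) (m : Option Int) : Bool :=   -- x <= m, none = +inf
  match m with | none => true | some a => decide (x ≤ a)
def pvLtO (x : Int) (m : Option Int) : Bool :=   -- x < m, none = +inf
  match m with | none => true | some a => decide (x < a)
def pvGeO (x : Int) (m : Option Int) : Bool :=   -- x >= m, none = -inf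
  match m with | none => true | some a => decide (a ≤ x)
def pvGtO (x : Int) (m : Option Int) : Bool :=   -- x > m, none = -inf
  match m with | none => true | some a => decide (a < x)

-- the first if-block of A's loop body (min1/min2 update)
def pvStepMin (p : Option Int × Option Int) (x : Int) : Option Int × Option Int :=
  if pvLeO x p.1 then (some x, p.1)
  else if pvLtO x p.2 then (p.1, some x)
  else p

-- the second if-block of A's loop body (max1/max2 update)
def pvStepMax (q : Option Int × Option Int) (x : Int) : Option Int × Option Int :=
  if pvGeO x q.1 then (some x, q.1)
  else if pvGtO x q.2 then (q.1, some x)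
  else q

def pvStep (st : (Option Int × Option Int) × (Option Int × Option Int)) (x : Int) :
    (Option Int × Option Int) × (Option Int × Option Int) :=
  (pvStepMin st.1 x, pvStepMax st.2 x)

def calculate (arr : List Int) : Int :=
  if arr.length < 2 then 0   -- Python raises ValueError here; excluded by Pre_calculate
  else
    match arr.foldl pvStep ((none, none), (none, none)) with
    | ((some min1, some min2), (some max1, some max2)) =>
        if min1 > 0 then min1 * min2
        else if max1 < 0 then max1 * max2
        else min1 * max1
    | _ => 0   -- unreachable: with ≥ 2 elements all four trackers are set

-- ===== PORT B =====
def calculate_alt (arr : List Int) : Int :=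
  if arr.length < 2 then 0   -- Python raises ValueError here; excluded by Pre_calculate
  else
    let s := PySem.List.sorted arr (fun x => x) false
    min (min (PySem.List.pyGetD s 0 0 * PySem.List.pyGetD s 1 0)
             (PySem.List.pyGetD s (-1) 0 * PySem.List.pyGetD s (-2) 0))
        (PySem.List.pyGetD s 0 0 * PySem.List.pyGetD s (-1) 0)

-- ===== PRECONDITION & SPEC =====
-- Pre_ excludes exactly the inputs (length < 2) on which Python A raises ValueError.
def Pre_calculate (arr : List Int) : Prop := 2 ≤ arr.length
instance (arr : List Int) : Decidable (Pre_calculate arr) := by unfold Pre_calculate; infer_instance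
def pvWitness_calculate : List Int := [3, -1, 4]

def Spec_calculate (arr : List Int) (out : Int) : Prop := out = calculate_alt arr
instance (arr : List Int) (out : Int) : Decidable (Spec_calculate arr out) := by unfold Spec_calculate; infer_instance

-- ===== CLAIM (what is proved, stated in full; the proofs are below) =====
def Claim_equal_calculate : Prop := ∀ (arr : List Int), Dom_calculate arr → Pre_calculate arr → Spec_calculate arr (calculate arr)

-- ===== LEMMAS AND PROOFS =====

-- the insertion step of PySem's insertion sort, specialised to Int with the identity key
def pvIns (x : Int) (s : List Int) : List Int :=
  PySem.List.insertBy (fun a b => decide (a < b)) x s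

-- first two elements of a list (as Options)
def pvFront2 : List Int → Option Int × Option Int
  | [] => (none, none)
  | [a] => (some a, none)
  | a :: b :: _ => (some a, some b)

-- last two elements of a list: (last, second-to-last)
def pvBack2 : List Int → Option Int × Option Int
  | [] => (none, none)
  | [a] => (some a, none)
  | [a, b] => (some b, some a)
  | _ :: b :: c :: t => pvBack2 (b :: c :: t)

lemma pvBack2_cons (a : Int) (l : List Int) (h : 2 ≤ l.length) :
    pvBack2 (a :: l) = pvBack2 l := by
  match l, h with
  | b :: c :: t, _ => rfl

lemma pvFront2_eq (s : List Int) (h : 2 ≤ s.length) :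
    pvFront2 s = (some (s.getD 0 0), some (s.getD 1 0)) := by
  match s, h with
  | a :: b :: t, _ => rfl

lemma pvBack2_eq (s : List Int) (h : 2 ≤ s.length) :
    pvBack2 s = (some (s.getD (s.length - 1) 0), some (s.getD (s.length - 2) 0)) := by
  induction s with
  | nil => simp at h
  | cons a l ih =>
    match l, h with
    | [b], _ => rfl
    | b :: c :: t, _ =>
      rw [pvBack2_cons a (b :: c :: t) (by simp)]
      rw [ih (by simp)]
      have h1 : (a :: b :: c :: t).length - 1 = ((b :: c :: t).length - 1) + 1 := by
        simp
      have h2 : (a :: b :: c :: t).length - 2 = ((b :: c :: t).length - 2) + 1 := by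
        simp
      rw [h1, h2, List.getD_cons_succ, List.getD_cons_succ]

lemma pvIns_length (x : Int) (s : List Int) : (pvIns x s).length = s.length + 1 := by
  induction s with
  | nil => rfl
  | cons y ys ih =>
    simp only [pvIns, PySem.List.insertBy] at ih ⊢
    split <;> simp [ih]

lemma pvIns_pairwise (x : Int) (s : List Int) (h : s.Pairwise (· ≤ ·)) :
    (pvIns x s).Pairwise (· ≤ ·) := by
  induction s with
  | nil => simp [pvIns, PySem.List.insertBy]
  | cons y ys ih =>
    rcases List.pairwise_cons.mp h with ⟨hy, hys⟩
    simp only [pvIns, PySem.List.insertBy]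
    split
    · rename_i hlt
      simp only [decide_eq_true_eq] at hlt
      refine List.pairwise_cons.mpr ⟨?_, h⟩
      intro z hz
      rcases List.mem_cons.mp hz with rfl | hz'
      · omega
      · have := hy z hz'; omega
    · rename_i hnlt
      simp only [decide_eq_true_eq] at hnlt
      refine List.pairwise_cons.mpr ⟨?_, ih hys⟩
      intro z hz
      rcases (PySem.List.mem_insertBy (before := fun a b => decide (a < b))
        (x := x) (ys := ys) (y := z)).mp hz with rfl | hz'
      · omega
      · exact hy z hz'

lemma pvFront2_pvIns (x : Int) (s : List Int) (h : s.Pairwise (· ≤ ·)) :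
    pvFront2 (pvIns x s) = pvStepMin (pvFront2 s) x := by
  cases s with
  | nil => simp [pvIns, PySem.List.insertBy, pvFront2, pvStepMin, pvLeO]
  | cons a l =>
    cases l with
    | nil =>
      simp only [pvIns, PySem.List.insertBy, pvFront2, pvStepMin, pvLeO, pvLtO]
      by_cases hxa : x < a
      · simp [hxa, show x ≤ a by omega]
      · by_cases hxa' : x ≤ a
        · simp only [hxa, decide_false, Bool.false_eq_true, if_false, hxa', decide_true, if_true]
          have : x = a := by omega
          simp [this]
        · simp [hxa, hxa']
    | cons b t =>
      have hab : a ≤ b := (List.pairwise_cons.mp h).1 b (by simp)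
      simp only [pvIns, PySem.List.insertBy, pvFront2, pvStepMin, pvLeO, pvLtO]
      by_cases hxa : x < a
      · simp [hxa, show x ≤ a by omega]
      · by_cases hxa' : x ≤ a
        · have hxeq : x = a := by omega
          by_cases hxb : x < b <;>
            simp [hxa, hxa', hxb] <;> omega
        · by_cases hxb : x < b <;>
            simp [hxa, hxa', hxb]

lemma pvBack2_pvIns (x : Int) (s : List Int) (h : s.Pairwise (· ≤ ·)) :
    pvBack2 (pvIns x s) = pvStepMax (pvBack2 s) x := by
  induction s with
  | nil => simp [pvIns, PySem.List.insertBy, pvBack2, pvStepMax, pvGeO]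
  | cons a l ih =>
    cases l with
    | nil =>
      simp only [pvIns, PySem.List.insertBy, pvBack2, pvStepMax, pvGeO, pvGtO]
      by_cases hxa : x < a
      · simp [hxa, pvBack2, show ¬ a ≤ x by omega]
      · simp [hxa, pvBack2, show a ≤ x by omega]
    | cons b t =>
      cases t with
      | nil =>
        have hab : a ≤ b := (List.pairwise_cons.mp h).1 b (by simp)
        simp only [pvIns, PySem.List.insertBy, pvBack2, pvStepMax, pvGeO, pvGtO]
        by_cases hxa : x < a
        · simp [hxa, pvBack2, show ¬ b ≤ x by omega, show ¬ a < x by omega]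
        · by_cases hxb : x < b
          · by_cases hax : a < x <;>
              simp [hxa, hxb, pvBack2, show ¬ b ≤ x by omega, hax]
            omega
          · simp [hxa, hxb, pvBack2, show b ≤ x by omega]
      | cons c r =>
        have hal : ∀ z ∈ b :: c :: r, a ≤ z := (List.pairwise_cons.mp h).1
        have htl : (b :: c :: r).Pairwise (· ≤ ·) := (List.pairwise_cons.mp h).2
        have ih' := ih htl
        by_cases hxa : x < a
        · -- x goes in front: back pair of a 5+-element list ignores its first two entries
          have hins : pvIns x (a :: b :: c :: r) = x :: a :: b :: c :: r := by
            simp [pvIns, PySem.List.insertBy, hxa]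
          rw [hins, show pvBack2 (x :: a :: b :: c :: r) = pvBack2 (b :: c :: r) from rfl,
            pvBack2_cons a (b :: c :: r) (by simp)]
          -- RHS: both tests fail, every tracked value is ≥ a > x
          rw [pvBack2_eq (b :: c :: r) (by simp)]
          have hL : (b :: c :: r).getD ((b :: c :: r).length - 1) 0 ∈ b :: c :: r := by
            rw [List.getD_eq_getElem _ _ (by simp)]
            exact List.getElem_mem _
          have hSL : (b :: c :: r).getD ((b :: c :: r).length - 2) 0 ∈ b :: c :: r := by
            rw [List.getD_eq_getElem _ _ (by simp)]
            exact List.getElem_mem _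
          have h1 := hal _ hL
          have h2 := hal _ hSL
          simp only [pvStepMax, pvGeO, pvGtO]
          rw [if_neg (by simp only [decide_eq_true_eq]; omega),
            if_neg (by simp only [decide_eq_true_eq]; omega)]
        · -- x sinks into the tail: first element a survives and is dropped by pvBack2 on both sides
          have hins : pvIns x (a :: b :: c :: r) = a :: pvIns x (b :: c :: r) := by
            simp [pvIns, PySem.List.insertBy, hxa]
          rw [hins, pvBack2_cons a _ (by rw [pvIns_length]; simp),
            pvBack2_cons a (b :: c :: r) (by simp), ih']

lemma pvFold (t : List Int) : ∀ s : List Int, s.Pairwise (· ≤ ·) →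
    List.foldl pvStep (pvFront2 s, pvBack2 s) t =
      (pvFront2 (t.foldl (fun acc x => pvIns x acc) s),
       pvBack2 (t.foldl (fun acc x => pvIns x acc) s)) := by
  induction t with
  | nil => intro s _; rfl
  | cons x t ih =>
    intro s hs
    have hstep : pvStep (pvFront2 s, pvBack2 s) x = (pvFront2 (pvIns x s), pvBack2 (pvIns x s)) := by
      simp only [pvStep, pvFront2_pvIns x s hs, pvBack2_pvIns x s hs]
    simp only [List.foldl_cons, hstep, ih (pvIns x s) (pvIns_pairwise x s hs)]

-- the three-candidate minimum over a sorted quadruple equals A's sign-based case split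
lemma pvArith (a b sl l : Int) (hab : a ≤ b) (hsl : sl ≤ l) (hasl : a ≤ sl) (hbl : b ≤ l) :
    (if a > 0 then a * b else if l < 0 then l * sl else a * l)
      = min (min (a * b) (l * sl)) (a * l) := by
  split_ifs with h1 h2
  · have hb0 : 0 < b := lt_of_lt_of_le h1 hab
    have hsl0 : 0 < sl := lt_of_lt_of_le h1 hasl
    have c12 : a * b ≤ l * sl := by
      nlinarith [mul_nonneg (sub_nonneg.mpr hasl) (le_of_lt hb0),
        mul_nonneg (sub_nonneg.mpr hbl) (le_of_lt hsl0)]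
    have c13 : a * b ≤ a * l := by
      nlinarith [mul_nonneg (sub_nonneg.mpr hbl) (le_of_lt h1)]
    rw [min_eq_left c12, min_eq_left c13]
  · have d1 : l * sl ≤ a * b := by
      nlinarith [mul_nonneg (sub_nonneg.mpr hbl) (by omega : (0:ℤ) ≤ -sl),
        mul_nonneg (sub_nonneg.mpr hasl) (by omega : (0:ℤ) ≤ -b)]
    have d2 : l * sl ≤ a * l := by
      nlinarith [mul_nonneg (sub_nonneg.mpr hasl) (by omega : (0:ℤ) ≤ -l)]
    rw [min_eq_right d1, min_eq_left d2]
  · have e1 : a * l ≤ a * b := by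
      nlinarith [mul_nonneg (sub_nonneg.mpr hbl) (by omega : (0:ℤ) ≤ -a)]
    have e2 : a * l ≤ l * sl := by
      nlinarith [mul_nonneg (sub_nonneg.mpr hasl) (by omega : (0:ℤ) ≤ l)]
    rw [min_eq_right (le_min e1 e2)]

-- ===== VERDICT (by name: the statement is the Claim_ definition above) =====
theorem calculate_spec : Claim_equal_calculate := by
  intro arr _ hpre
  unfold Pre_calculate at hpre
  unfold Spec_calculate calculate calculate_alt
  rw [if_neg (by omega), if_neg (by omega)]
  -- A's fold computes the front/back pairs of the sorted list
  have hfold : arr.foldl pvStep ((none, none), (none, none)) =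
      (pvFront2 (PySem.List.sorted arr (fun x => x) false),
       pvBack2 (PySem.List.sorted arr (fun x => x) false)) := by
    have h0 : List.foldl pvStep ((none, none), (none, none)) arr =
        (pvFront2 (arr.foldl (fun acc x => pvIns x acc) []),
         pvBack2 (arr.foldl (fun acc x => pvIns x acc) [])) :=
      pvFold arr [] List.Pairwise.nil
    simp only [pvIns] at h0
    rw [h0, PySem.List.sorted_eq_foldl_insertBy arr (fun x => x)]
  set s := PySem.List.sorted arr (fun x => x) false with hs
  have hlen : s.length = arr.length := PySem.List.length_sorted arr (fun x => x) false
  have h2 : 2 ≤ s.length := by omega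
  rw [hfold, pvFront2_eq s h2, pvBack2_eq s h2]
  show (if s.getD 0 0 > 0 then s.getD 0 0 * s.getD 1 0
        else if s.getD (s.length - 1) 0 < 0 then
          s.getD (s.length - 1) 0 * s.getD (s.length - 2) 0
        else s.getD 0 0 * s.getD (s.length - 1) 0)
      = min (min (PySem.List.pyGetD s 0 0 * PySem.List.pyGetD s 1 0)
               (PySem.List.pyGetD s (-1) 0 * PySem.List.pyGetD s (-2) 0))
            (PySem.List.pyGetD s 0 0 * PySem.List.pyGetD s (-1) 0)
  -- sortedness gives the order of the four extremes
  have hpair : s.Pairwise (· ≤ ·) := PySem.List.sorted_pairwise arr (fun x => x)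
  have hmono : ∀ p q (hp : p < s.length) (hq : q < s.length), p ≤ q →
      s.getD p 0 ≤ s.getD q 0 := by
    intro p q hp hq hpq
    rw [List.getD_eq_getElem s 0 hp, List.getD_eq_getElem s 0 hq]
    rcases Nat.eq_or_lt_of_le hpq with rfl | h
    · exact le_refl _
    · exact List.pairwise_iff_getElem.mp hpair p q hp hq h
  have hab : s.getD 0 0 ≤ s.getD 1 0 := hmono 0 1 (by omega) (by omega) (by omega)
  have hsl : s.getD (s.length - 2) 0 ≤ s.getD (s.length - 1) 0 :=
    hmono _ _ (by omega) (by omega) (by omega)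
  have hasl : s.getD 0 0 ≤ s.getD (s.length - 2) 0 :=
    hmono _ _ (by omega) (by omega) (by omega)
  have hbl : s.getD 1 0 ≤ s.getD (s.length - 1) 0 :=
    hmono _ _ (by omega) (by omega) (by omega)
  -- B's subscripts are those same four extremes
  have hp0 : PySem.List.pyGetD s 0 0 = s.getD 0 0 := PySem.List.pyGetD_ofNat' s 0 0
  have hp1 : PySem.List.pyGetD s 1 0 = s.getD 1 0 := PySem.List.pyGetD_ofNat' s 1 0
  have hpL : PySem.List.pyGetD s (-1) 0 = s.getD (s.length - 1) 0 := by
    rw [PySem.List.pyGetD_neg_ofNat s 1 0 (by omega) (by omega),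
      List.getD_eq_getElem s 0 (by omega)]
  have hpSL : PySem.List.pyGetD s (-2) 0 = s.getD (s.length - 2) 0 := by
    rw [PySem.List.pyGetD_neg_ofNat s 2 0 (by omega) (by omega),
      List.getD_eq_getElem s 0 (by omega)]
  rw [hp0, hp1, hpL, hpSL]
  exact pvArith _ _ _ _ hab hsl hasl hbl
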